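-- pv_equiv track=rewrite | github.com/Latent-Fields/REE_assembly | evidence/planning/scripts/build_connectome_literature_pull.py | _dependents_map
-- ===== SOURCE A (Python) =====
-- from collections import defaultdict
-- from typing import Any
--
-- def _dependents_map(claims: dict[str, dict[str, Any]]) -> dict[str, list[str]]:
--     out: dict[str, list[str]] = defaultdict(list)
--     for claim_id, meta in claims.items():
--         for dep in meta.get("depends_on", []):
--             out[str(dep)].append(claim_id)
--     for key in out:
--         out[key].sort()
--     return dict(out)
-- ===== SOURCE B (Python) =====
-- def _dependents_map(claims):
--     # Visit claims in ascending id order so each bucket is built already sorted: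
--     # no per-bucket sort pass. Key order (first occurrence of a dep in the
--     # original claim order) is fixed up front via dict.fromkeys.
--     order = list(dict.fromkeys(
--         str(d) for meta in claims.values() for d in meta.get("depends_on", [])))
--     buckets = {k: [] for k in order}
--     for cid, meta in sorted(claims.items(), key=lambda kv: kv[0]):
--         for d in meta.get("depends_on", []):
--             buckets[str(d)].append(cid)
--     return buckets
-- ===== Notes on version B (the rewrite author's own statement) =====
-- stated objective: alternative
-- what changed: Instead of appending dependents in claim-insertion order and then sorting every bucket, B fixes the key order up front (ordered dedup of the dep stream) and fills the buckets in a single pass over the claims sorted by id, so each bucket is built already sorted and the per-bucket sort loop disappears.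
import Mathlib
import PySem

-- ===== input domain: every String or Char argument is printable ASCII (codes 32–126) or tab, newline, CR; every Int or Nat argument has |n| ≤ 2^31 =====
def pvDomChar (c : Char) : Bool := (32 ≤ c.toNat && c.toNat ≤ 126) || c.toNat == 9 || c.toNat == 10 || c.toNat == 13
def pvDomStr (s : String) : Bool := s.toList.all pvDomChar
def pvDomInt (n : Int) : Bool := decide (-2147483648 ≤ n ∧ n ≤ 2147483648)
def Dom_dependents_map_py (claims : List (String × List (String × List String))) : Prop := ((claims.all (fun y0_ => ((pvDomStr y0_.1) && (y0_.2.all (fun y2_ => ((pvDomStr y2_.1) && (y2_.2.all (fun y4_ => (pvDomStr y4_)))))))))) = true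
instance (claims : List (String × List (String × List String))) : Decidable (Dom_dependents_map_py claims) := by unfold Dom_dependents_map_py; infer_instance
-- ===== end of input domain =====

-- B inverts the dependency map in one pass over the claims sorted by id (each bucket
-- is built already sorted, so the per-bucket sort pass disappears), fixing the key
-- order up front; objective: alternative decomposition, same cost.

-- m.get("depends_on", [])  (m is a Python dict, rendered as an assoc list)
def pyDeps (m : List (String × List String)) : List String :=
  PySem.Dict.getD (PySem.Dict.ofList m) "depends_on" []

-- ===== PORT A =====
def dependents_map_py (claims : List (String × List (String × List String))) : List (String × List String) :=
  -- out = defaultdict(list); for claim_id, meta in claims.items():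
  --   for dep in meta.get("depends_on", []): out[str(dep)].append(claim_id)
  let out : PySem.Dict String (List String) :=
    (PySem.Dict.ofList claims).items.foldl
      (fun out p => (pyDeps p.2).foldl
        (fun out dep => out.modify dep [] (· ++ [p.1])) out)
      PySem.Dict.empty
  -- for key in out: out[key].sort()
  let out2 : PySem.Dict String (List String) :=
    out.keys.foldl
      (fun d k => d.insert k (PySem.List.sorted (d.getD k []) (fun x => x) false)) out
  -- dict(out)
  out2.items

-- ===== PORT B =====
def dependents_map_py_alt (claims : List (String × List (String × List String))) : List (String × List String) :=
  let its := (PySem.Dict.ofList claims).items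
  -- order = list(dict.fromkeys(str(d) for meta in claims.values() for d in meta.get("depends_on", [])))
  let order := PySem.List.dedup (its.flatMap (fun p => pyDeps p.2))
  -- buckets = {k: [] for k in order}
  let buckets : PySem.Dict String (List String) :=
    PySem.Dict.ofList (order.map (fun k => (k, ([] : List String))))
  -- for cid, meta in sorted(claims.items(), key=lambda kv: kv[0]):
  --   for d in meta.get("depends_on", []): buckets[str(d)].append(cid)
  -- (every dep is a key of buckets, so Python's buckets[str(d)] never raises; modify is exact here)
  let filled :=
    (PySem.List.sorted its (fun kv => kv.1) false).foldl
      (fun d p => (pyDeps p.2).foldl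
        (fun d dep => d.modify dep [] (· ++ [p.1])) d)
      buckets
  filled.items

-- ===== PRECONDITION & SPEC =====
def Spec_dependents_map_py (claims : List (String × List (String × List String))) (out : List (String × List String)) : Prop := out = dependents_map_py_alt claims
instance (claims : List (String × List (String × List String))) (out : List (String × List String)) : Decidable (Spec_dependents_map_py claims out) := by unfold Spec_dependents_map_py; infer_instance

-- ===== CLAIM (what is proved, stated in full; the proofs are below) =====
def Claim_equal_dependents_map_py : Prop := ∀ (claims : List (String × List (String × List String))), Dom_dependents_map_py claims → Spec_dependents_map_py claims (dependents_map_py claims)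

-- ===== LEMMAS AND PROOFS =====

-- the flattened (dep, claim_id) pair stream of a claims item list
def pvPairs (its : List (String × List (String × List String))) : List (String × String) :=
  its.flatMap (fun p => (pyDeps p.2).map (fun d => (d, p.1)))

-- the claim ids appended to bucket k, in stream order
def pvBucket (l : List (String × String)) (k : String) : List String :=
  (l.filter (fun q => q.1 == k)).map (fun q => q.2)

-- the nested fill loop is a single fold over the pair stream
theorem pv_fill_eq (its : List (String × List (String × List String)))
    (init : PySem.Dict String (List String)) :
    its.foldl (fun out p => (pyDeps p.2).foldl
        (fun out dep => out.modify dep [] (· ++ [p.1])) out) init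
    = (pvPairs its).foldl (fun d q => d.modify q.1 [] (· ++ [q.2])) init := by
  rw [pvPairs, List.foldl_flatMap]
  apply PySem.List.foldl_congr_mem
  intro acc x _
  rw [List.foldl_map]

-- the keys hit by the pair stream are exactly the dep strings
theorem pv_pairs_map_fst (its : List (String × List (String × List String))) :
    (pvPairs its).map (fun q => q.1) = its.flatMap (fun p => pyDeps p.2) := by
  simp [pvPairs, List.map_flatMap, Function.comp_def]

-- a set already containing every element of l is unchanged by update
theorem pv_set_update_subset (l s : List String) (h : ∀ x ∈ l, x ∈ s) :
    PySem.Set.update s l = s := by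
  induction l generalizing s with
  | nil => rfl
  | cons x t ih =>
    have hadd : PySem.Set.add s x = s := by
      simp [PySem.Set.add]
      exact h x List.mem_cons_self
    simp only [PySem.Set.update, List.foldl_cons] at *
    rw [hadd]
    exact ih s (fun y hy => h y (List.mem_cons_of_mem _ hy))

-- stage-2 loop of A: overwrite each key of a nodup key list with its sorted value
theorem pv_foldl_insert_sorted_getD (ks : List String)
    (d : PySem.Dict String (List String)) (hnd : ks.Nodup) (k : String) :
    (ks.foldl (fun d k => d.insert k (PySem.List.sorted (d.getD k []) (fun x => x) false)) d).getD k []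
    = if k ∈ ks then PySem.List.sorted (d.getD k []) (fun x => x) false else d.getD k [] := by
  induction ks generalizing d with
  | nil => simp
  | cons k0 t ih =>
    simp only [List.foldl_cons]
    rcases List.nodup_cons.mp hnd with ⟨hk0, hnt⟩
    rw [ih _ hnt]
    by_cases hk : k ∈ t
    · have hne : k ≠ k0 := fun h => hk0 (h ▸ hk)
      simp [hk, hne, PySem.Dict.getD_insert_of_ne _ _ _ hne]
    · by_cases he : k = k0
      · subst he; simp [hk, PySem.Dict.getD_insert_self]
      · simp [hk, he, PySem.Dict.getD_insert_of_ne _ _ _ he]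

-- every value in bucket k of the pair stream is the id of some claim of the list
theorem pv_mem_bucket (l : List (String × List (String × List String)))
    (k y : String) (h : y ∈ pvBucket (pvPairs l) k) : ∃ q ∈ l, y = q.1 := by
  simp only [pvBucket, pvPairs, List.mem_map, List.mem_filter, List.mem_flatMap] at h
  rcases h with ⟨q, ⟨⟨p, hp, ⟨d, _, hdq⟩⟩, _⟩, hy⟩
  exact ⟨p, hp, by rw [← hy, ← hdq]⟩

-- if the claims are listed in ascending id order, every bucket comes out sorted
theorem pv_bucket_pairwise (l : List (String × List (String × List String)))
    (k : String) (h : l.Pairwise (fun a b => a.1 ≤ b.1)) :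
    (pvBucket (pvPairs l) k).Pairwise (· ≤ ·) := by
  induction l with
  | nil => simp [pvBucket, pvPairs]
  | cons p t ih =>
    rcases List.pairwise_cons.mp h with ⟨hp, ht⟩
    have hsplit : pvBucket (pvPairs (p :: t)) k
        = pvBucket (((pyDeps p.2).map (fun d => (d, p.1)))) k ++ pvBucket (pvPairs t) k := by
      simp [pvBucket, pvPairs, List.filter_append]
    rw [hsplit]
    have hconst : ∀ x ∈ pvBucket (((pyDeps p.2).map (fun d => (d, p.1)))) k, x = p.1 := by
      intro x hx
      simp only [pvBucket, List.mem_map, List.mem_filter] at hx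
      rcases hx with ⟨q, ⟨⟨d, _, hdq⟩, _⟩, hy⟩
      rw [← hy, ← hdq]
    refine List.pairwise_append.mpr ⟨?_, ih ht, ?_⟩
    · exact List.pairwise_of_forall_mem_list
        (fun a ha b hb => by rw [hconst a ha, hconst b hb])
    · intro a ha b hb
      rcases pv_mem_bucket t k b hb with ⟨q, hq, hbq⟩
      rw [hconst a ha, hbq]
      exact hp q hq

-- the two bucket contents agree: sorting A's raw bucket gives B's bucket
theorem pv_bucket_eq (its : List (String × List (String × List String))) (k : String) :
    PySem.List.sorted (pvBucket (pvPairs its) k) (fun x => x) false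
    = pvBucket (pvPairs (PySem.List.sorted its (fun kv => kv.1) false)) k := by
  apply PySem.List.sorted_id_eq_of_perm_of_pairwise
  · exact ((List.Perm.flatMap_right _
      (PySem.List.sorted_perm its (fun kv => kv.1) false)).filter _).map _
  · exact pv_bucket_pairwise _ k (PySem.List.sorted_pairwise its (fun kv => kv.1))

-- characterisation of A: keys in first-occurrence order, each with its sorted raw bucket
theorem pv_A_char (claims : List (String × List (String × List String))) :
    dependents_map_py claims
    = (PySem.Set.ofList ((PySem.Dict.ofList claims).items.flatMap (fun p => pyDeps p.2))).map
        (fun k => (k, PySem.List.sorted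
          (pvBucket (pvPairs (PySem.Dict.ofList claims).items) k) (fun x => x) false)) := by
  simp only [dependents_map_py]
  set its := (PySem.Dict.ofList claims).items with hits
  rw [pv_fill_eq]
  set fill := (pvPairs its).foldl (fun d q => d.modify q.1 [] (· ++ [q.2])) PySem.Dict.empty
    with hfill
  have hkeys : fill.keys = PySem.Set.ofList (its.flatMap (fun p => pyDeps p.2)) := by
    rw [hfill, PySem.Dict.keys_foldl_modify_key (pvPairs its) (fun q => q.1) []
      (fun _ q => (· ++ [q.2])) PySem.Dict.empty, PySem.Dict.keys_empty,
      pv_pairs_map_fst, PySem.Set.ofList_eq_foldl]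
    rfl
  have hnd : fill.keys.Nodup := by
    rw [hkeys]; exact PySem.Set.nodup_ofList _
  have hgetD : ∀ k, fill.getD k [] = pvBucket (pvPairs its) k := by
    intro k
    rw [hfill, PySem.Dict.getD_foldl_modify_append, PySem.Dict.getD_empty]
    rfl
  set out2 := fill.keys.foldl
    (fun d k => d.insert k (PySem.List.sorted (d.getD k []) (fun x => x) false)) fill
    with hout2
  have hkeys2 : out2.keys = fill.keys := by
    rw [hout2, PySem.Dict.keys_foldl_insert]
    exact pv_set_update_subset _ _ (fun x hx => hx)
  have hnd2 : out2.keys.Nodup := by rw [hkeys2]; exact hnd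
  rw [PySem.Dict.items_eq_map_keys out2 hnd2 [], hkeys2, hkeys]
  apply List.map_congr_left
  intro k hk
  rw [hout2, pv_foldl_insert_sorted_getD _ _ hnd k, if_pos (hkeys ▸ hk), hgetD]

-- characterisation of B: same keys, each with the bucket of the sorted pair stream
theorem pv_B_char (claims : List (String × List (String × List String))) :
    dependents_map_py_alt claims
    = (PySem.Set.ofList ((PySem.Dict.ofList claims).items.flatMap (fun p => pyDeps p.2))).map
        (fun k => (k, pvBucket
          (pvPairs (PySem.List.sorted (PySem.Dict.ofList claims).items (fun kv => kv.1) false)) k)) := by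
  simp only [dependents_map_py_alt]
  set its := (PySem.Dict.ofList claims).items with hits
  rw [PySem.List.dedup_eq_ofList]
  set order := PySem.Set.ofList (its.flatMap (fun p => pyDeps p.2)) with horder
  have hndo : order.Nodup := PySem.Set.nodup_ofList _
  set buckets : PySem.Dict String (List String) :=
    PySem.Dict.ofList (order.map (fun k => (k, ([] : List String)))) with hbuck
  have hbitems : buckets.items = order.map (fun k => (k, ([] : List String))) := by
    rw [hbuck, show PySem.Dict.ofList (order.map (fun k => (k, ([] : List String))))
        = (order.map (fun k => (k, ([] : List String)))).foldl
            (fun d p => d.insert p.1 p.2) PySem.Dict.empty from rfl,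
      List.foldl_map]
    rw [PySem.Dict.items_foldl_insert_fresh order (fun k => k) (fun _ => []) PySem.Dict.empty
      (fun _ _ => PySem.Dict.contains_empty _) (by simpa using hndo)]
    simp [show (PySem.Dict.empty : PySem.Dict String (List String)).items = [] from rfl]
  have hbkeys : buckets.keys = order := by
    show buckets.items.map (fun p => p.1) = order
    rw [hbitems]; simp [Function.comp_def]
  have hbgetD : ∀ k, buckets.getD k [] = [] := by
    intro k
    by_cases hk : k ∈ order
    · exact PySem.Dict.getD_of_mem_items buckets
        (by rw [hbitems]; exact List.mem_map.mpr ⟨k, hk, rfl⟩) (hbkeys ▸ hndo) []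
    · refine PySem.Dict.getD_of_not_contains buckets [] ?_
      rw [PySem.Dict.contains_eq_decide_mem_keys, hbkeys]
      simpa using hk
  rw [pv_fill_eq]
  set sp := pvPairs (PySem.List.sorted its (fun kv => kv.1) false) with hsp
  set filled := sp.foldl (fun d q => d.modify q.1 [] (· ++ [q.2])) buckets with hfilled
  have hsub : ∀ x ∈ sp.map (fun q => q.1), x ∈ order := by
    intro x hx
    rw [hsp, pv_pairs_map_fst] at hx
    rcases List.mem_flatMap.mp hx with ⟨p, hp, hxd⟩
    rw [horder, PySem.Set.mem_ofList]
    exact List.mem_flatMap.mpr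
      ⟨p, (PySem.List.sorted_perm its (fun kv => kv.1) false).mem_iff.mp hp, hxd⟩
  have hfkeys : filled.keys = order := by
    rw [hfilled, PySem.Dict.keys_foldl_modify_key sp (fun q => q.1) []
      (fun _ q => (· ++ [q.2])) buckets, hbkeys]
    exact pv_set_update_subset _ _ hsub
  have hfgetD : ∀ k, filled.getD k [] = pvBucket sp k := by
    intro k
    rw [hfilled, PySem.Dict.getD_foldl_modify_append, hbgetD]
    rfl
  rw [PySem.Dict.items_eq_map_keys filled (hfkeys ▸ hndo) [], hfkeys]
  exact List.map_congr_left (fun k _ => by rw [hfgetD])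

-- ===== VERDICT (by name: the statement is the Claim_ definition above) =====
theorem dependents_map_py_spec : Claim_equal_dependents_map_py := by
  intro claims _
  show dependents_map_py claims = dependents_map_py_alt claims
  rw [pv_A_char, pv_B_char]
  exact List.map_congr_left (fun k _ => by rw [pv_bucket_eq])
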